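-- pv_equiv track=rewrite | github.com/chirsz-ever/aoc | 2024/07/ans2.py | has_answer
-- ===== SOURCE A (Python) =====
-- def has_answer(target: int, numbers: list[int]) -> bool:
--     assert len(numbers) > 0
--     if len(numbers) == 1:
--         return target == numbers[0]
--     m = numbers[-1]
--     if target % m == 0:
--         if has_answer(target // m, numbers[:-1]):
--             return True
--     if target > m:
--         if has_answer(target - m, numbers[:-1]):
--             return True
--         t = ten(m)
--         l = (target - m) // t
--         if target == l * t + m:
--             if has_answer(l, numbers[:-1]):
--                 return True
--     return False
--
-- def ten(m: int) -> int:
--     return 10**len(str(m))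
-- ===== SOURCE B (Python) =====
-- def has_answer(target: int, numbers: list[int]) -> bool:
--     assert len(numbers) > 0
--     # Forward pass: set of all partial results. In A's backward search, '+' and
--     # concatenation are only inverted while the remaining target stays above the
--     # operand, i.e. the left partial value is positive; forward, that means these
--     # two operators only extend positive partial values.
--     reach = {numbers[0]}
--     for n in numbers[1:]:
--         t = 10 ** len(str(n))
--         nxt = {v * n for v in reach}
--         nxt |= {v + n for v in reach if v > 0}
--         nxt |= {v * t + n for v in reach if v > 0}
--         reach = nxt
--     return target in reach
-- ===== Notes on version B (the rewrite author's own statement) =====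
-- stated objective: alternative
-- what changed: A's backward pruned recursion from the target is replaced by a forward pass that maintains the set of all partial results (extending by *, and by + and digit-concatenation from positive partial values, which is exactly what A's target>m pruning admits) and ends with one membership test.
-- outside the precondition, e.g. on has_answer(0, [1, 0, 3]): A raises ZeroDivisionError, B returns True; on has_answer(2, [2, 0, 3]): A returns False, B returns False
import Mathlib
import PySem

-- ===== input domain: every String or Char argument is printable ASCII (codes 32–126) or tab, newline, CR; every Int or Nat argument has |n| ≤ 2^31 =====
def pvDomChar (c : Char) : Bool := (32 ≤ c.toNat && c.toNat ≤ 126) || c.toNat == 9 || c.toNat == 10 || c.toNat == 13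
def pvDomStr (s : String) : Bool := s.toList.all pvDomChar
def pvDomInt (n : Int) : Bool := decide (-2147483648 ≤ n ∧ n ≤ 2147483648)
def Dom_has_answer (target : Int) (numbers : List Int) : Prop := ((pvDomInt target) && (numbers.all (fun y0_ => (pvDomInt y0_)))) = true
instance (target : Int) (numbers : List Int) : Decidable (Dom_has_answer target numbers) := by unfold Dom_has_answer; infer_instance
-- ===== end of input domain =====

-- B replaces A's backward pruned recursion by a forward pass over the set of partial results
-- (alternative decomposition, not claimed faster); equivalence is proved on Pre_ below.

-- ===== PORT A =====
-- ten(m) = 10**len(str(m))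
def ten_a (m : Int) : Int := 10 ^ (PySem.Int.toChars m).length

def has_answer (target : Int) (numbers : List Int) : Bool :=
  if _h : numbers.length ≤ 1 then
    -- 'assert len(numbers) > 0' fails on []: excluded by Pre_ (port returns false there)
    match numbers with
    | [] => false
    | x :: _ => target == x
  else
    let m := numbers.getLast!
    let pre := numbers.dropLast
    (decide (PySem.Int.mod target m = 0) && has_answer (PySem.Int.floordiv target m) pre)
    || (decide (m < target) &&
        (has_answer (target - m) pre
         || (let t := ten_a m
             let l := PySem.Int.floordiv (target - m) t
             decide (target = l * t + m) && has_answer l pre)))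
termination_by numbers.length
decreasing_by all_goals (simp [List.length_dropLast]; omega)

-- ===== PORT B =====
def ten_b (n : Int) : Int := 10 ^ (PySem.Int.toChars n).length

def step_b (reach : PySem.Set Int) (n : Int) : PySem.Set Int :=
  let t := ten_b n
  let nxt := PySem.Set.ofList (reach.map (fun v => v * n))
  let nxt := PySem.Set.update nxt ((reach.filter (fun v => decide (0 < v))).map (fun v => v + n))
  PySem.Set.update nxt ((reach.filter (fun v => decide (0 < v))).map (fun v => v * t + n))

def has_answer_alt (target : Int) (numbers : List Int) : Bool :=
  match numbers with
  | [] => false  -- 'assert len(numbers) > 0' fails: outside Pre_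
  | x :: rest => PySem.Set.contains (rest.foldl step_b (PySem.Set.ofList [x])) target

-- ===== PRECONDITION & SPEC =====
-- Pre_ excludes the empty list (A's assert fails) and every list with a 0 after the first
-- position: such a 0 becomes the trailing divisor of a backward step and A then raises
-- ZeroDivisionError; whether that step is reached depends on the target, so the whole
-- closed-form family is excluded, including inputs where A happens to return False.
def Pre_has_answer (target : Int) (numbers : List Int) : Prop :=
  numbers ≠ [] ∧ (0 : Int) ∉ numbers.drop 1
instance (target : Int) (numbers : List Int) : Decidable (Pre_has_answer target numbers) := by
  unfold Pre_has_answer; infer_instance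

def pvWitness_has_answer : Int × List Int := (190, [19, 10])

def Spec_has_answer (target : Int) (numbers : List Int) (out : Bool) : Prop := out = has_answer_alt target numbers
instance (target : Int) (numbers : List Int) (out : Bool) : Decidable (Spec_has_answer target numbers out) := by unfold Spec_has_answer; infer_instance

-- ===== CLAIM (what is proved, stated in full; the proofs are below) =====
def Claim_equal_has_answer : Prop := ∀ (target : Int) (numbers : List Int), Dom_has_answer target numbers → Pre_has_answer target numbers → Spec_has_answer target numbers (has_answer target numbers)

-- ===== LEMMAS AND PROOFS =====

-- exact floor division: (v*m) // m = v for m ≠ 0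
theorem pv_fdiv_mul_cancel (v m : Int) (hm : m ≠ 0) : PySem.Int.floordiv (v * m) m = v := by
  have hd : PySem.Int.mod (v * m) m = 0 :=
    (PySem.Int.mod_eq_zero_iff_dvd (v * m) m).2 (dvd_mul_left m v)
  have h := PySem.Int.floordiv_mul_add_mod (v * m) m
  rw [hd, add_zero] at h
  exact mul_right_cancel₀ hm h

-- membership in one forward step
theorem pv_mem_step_b (S : PySem.Set Int) (n y : Int) :
    y ∈ step_b S n ↔ (∃ v ∈ S, y = v * n) ∨ (∃ v ∈ S, 0 < v ∧ (y = v + n ∨ y = v * ten_b n + n)) := by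
  simp only [step_b, PySem.Set.mem_update, PySem.Set.mem_ofList, List.mem_map, List.mem_filter,
    decide_eq_true_eq]
  constructor
  · rintro (((⟨v, hv, rfl⟩ | ⟨v, ⟨hv, hpos⟩, rfl⟩) | ⟨v, ⟨hv, hpos⟩, rfl⟩))
    · exact Or.inl ⟨v, hv, rfl⟩
    · exact Or.inr ⟨v, hv, hpos, Or.inl rfl⟩
    · exact Or.inr ⟨v, hv, hpos, Or.inr rfl⟩
  · rintro (⟨v, hv, rfl⟩ | ⟨v, hv, hpos, (rfl | rfl)⟩)
    · exact Or.inl (Or.inl ⟨v, hv, rfl⟩)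
    · exact Or.inl (Or.inr ⟨v, ⟨hv, hpos⟩, rfl⟩)
    · exact Or.inr ⟨v, ⟨hv, hpos⟩, rfl⟩

-- one backward level of A, as a statement about inverse images (m ≠ 0, T > 0)
theorem pv_level_iff (S : List Int) (t m T : Int) (hm : m ≠ 0) (hT : 0 < T) :
    ((PySem.Int.mod t m = 0 ∧ PySem.Int.floordiv t m ∈ S) ∨
     (m < t ∧ (t - m ∈ S ∨
       (t = PySem.Int.floordiv (t - m) T * T + m ∧ PySem.Int.floordiv (t - m) T ∈ S))))
    ↔ ((∃ v ∈ S, t = v * m) ∨ (∃ v ∈ S, 0 < v ∧ (t = v + m ∨ t = v * T + m))) := by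
  constructor
  · rintro (⟨hmod, hmem⟩ | ⟨hlt, (hmem | ⟨heq, hmem⟩)⟩)
    · refine Or.inl ⟨PySem.Int.floordiv t m, hmem, ?_⟩
      have h := PySem.Int.floordiv_mul_add_mod t m
      rw [hmod, add_zero] at h
      omega
    · exact Or.inr ⟨t - m, hmem, by omega, Or.inl (by omega)⟩
    · refine Or.inr ⟨PySem.Int.floordiv (t - m) T, hmem, ?_, Or.inr heq⟩
      nlinarith [heq, hlt]
  · rintro (⟨v, hv, rfl⟩ | ⟨v, hv, hpos, (rfl | rfl)⟩)
    · refine Or.inl ⟨(PySem.Int.mod_eq_zero_iff_dvd (v * m) m).2 (dvd_mul_left m v), ?_⟩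
      rw [pv_fdiv_mul_cancel v m hm]; exact hv
    · exact Or.inr ⟨by nlinarith, Or.inl (by simpa using hv)⟩
    · have hcancel : PySem.Int.floordiv (v * T + m - m) T = v := by
        rw [add_sub_cancel_right, pv_fdiv_mul_cancel v T (by omega)]
      exact Or.inr ⟨by nlinarith, Or.inr ⟨by rw [hcancel], by rw [hcancel]; exact hv⟩⟩

theorem pv_ten_pos (m : Int) : 0 < ten_a m := by
  unfold ten_a; positivity

-- main invariant: A's backward search over x :: rest decides membership in B's forward set
theorem pv_main (rest : List Int) (x : Int) :
    (0 : Int) ∉ rest → ∀ target, (has_answer target (x :: rest) = true ↔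
      target ∈ rest.foldl step_b (PySem.Set.ofList [x])) := by
  induction rest using List.reverseRecOn with
  | nil =>
      intro _ target
      rw [has_answer]
      simp [PySem.Set.mem_ofList]
  | append_singleton rs m ih =>
      intro h0 target
      have h0' : (0 : Int) ∉ rs := fun h => h0 (List.mem_append_left _ h)
      have hm : m ≠ 0 := fun h => h0 (by simp [h])
      have hlen : ¬ (x :: (rs ++ [m])).length ≤ 1 := by simp
      rw [has_answer]
      simp only [hlen]
      have hlast : (x :: (rs ++ [m])).getLast! = m := by
        have : (x :: (rs ++ [m])) = (x :: rs) ++ [m] := by simp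
        rw [this, List.getLast!_eq_getLast?_getD, List.getLast?_concat]
        rfl
      have hdrop : (x :: (rs ++ [m])).dropLast = x :: rs := by
        have : (x :: (rs ++ [m])) = (x :: rs) ++ [m] := by simp
        rw [this, List.dropLast_concat]
      rw [hlast, hdrop, List.foldl_append, List.foldl_cons, List.foldl_nil,
        pv_mem_step_b]
      have hten : ten_b m = ten_a m := rfl
      rw [hten]
      rw [dif_neg not_false]
      simp only [Bool.or_eq_true, Bool.and_eq_true, decide_eq_true_eq, ih h0']
      exact pv_level_iff _ target m (ten_a m) hm (pv_ten_pos m)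

-- ===== VERDICT (by name: the statement is the Claim_ definition above) =====
theorem has_answer_spec : Claim_equal_has_answer := by
  intro target numbers _hdom hpre
  unfold Spec_has_answer
  obtain ⟨hne, h0⟩ := hpre
  match numbers with
  | [] => exact absurd rfl hne
  | x :: rest =>
      have h0' : (0 : Int) ∉ rest := by simpa using h0
      rw [has_answer_alt]
      rw [Bool.eq_iff_iff, pv_main rest x h0' target, PySem.Set.contains_iff]
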